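-- pv_equiv track=rewrite | github.com/Chenlin1984/Taiwan-Lotto-Intelligence | src/utils.py | compute_streak_numbers
-- ===== SOURCE A (Python) =====
-- from typing import Dict, List, Set, Tuple
--
-- def compute_streak_numbers(history: List[List[int]], streak: int = 3) -> List[int]:
--     """
--     回傳最近 streak 期「每期都出現」的號碼。
--     這些號碼連續出現次數過多，統計上下期迴避較佳。
--
--     Parameters
--     ----------
--     history : 歷史開獎資料（每筆為 6 個號碼的 list）
--     streak  : 連續期數門檻，預設 3
--
--     Returns
--     -------
--     排序後的號碼列表
--     """
--     if len(history) < streak: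
--         return []
--     recent_sets = [set(draw) for draw in history[-streak:]]
--     common = recent_sets[0]
--     for s in recent_sets[1:]:
--         common = common & s
--     return sorted(common)
-- ===== SOURCE B (Python) =====
-- def compute_streak_numbers(history, streak=3):
--     """Count, per number, in how many of the recent draws it appears (deduplicated
--     per draw) and keep those seen in every one of them; single counting pass
--     instead of folding pairwise set intersections."""
--     if len(history) < streak:
--         return []
--     recent = history[-streak:]
--     counts = {}
--     for draw in recent:
--         for n in set(draw):
--             counts[n] = counts.get(n, 0) + 1
--     return sorted(n for n, c in counts.items() if c == len(recent))
-- ===== Notes on version B (the rewrite author's own statement) =====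
-- stated objective: alternative
-- what changed: B replaces the fold of pairwise set intersections with a single occurrence counter over the deduplicated recent draws, keeping numbers whose count equals the number of recent draws.
import Mathlib
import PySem

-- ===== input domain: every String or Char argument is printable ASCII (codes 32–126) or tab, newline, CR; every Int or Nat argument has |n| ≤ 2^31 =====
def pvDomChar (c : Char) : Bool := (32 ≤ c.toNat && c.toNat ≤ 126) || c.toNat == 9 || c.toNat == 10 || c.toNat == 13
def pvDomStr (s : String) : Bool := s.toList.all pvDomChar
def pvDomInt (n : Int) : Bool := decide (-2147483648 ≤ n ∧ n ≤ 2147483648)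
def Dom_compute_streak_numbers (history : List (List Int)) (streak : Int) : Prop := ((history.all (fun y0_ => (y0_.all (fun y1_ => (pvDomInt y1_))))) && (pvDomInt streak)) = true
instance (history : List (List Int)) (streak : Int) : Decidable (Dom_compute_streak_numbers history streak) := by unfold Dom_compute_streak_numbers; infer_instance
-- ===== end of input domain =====

-- B counts, per number, in how many deduplicated recent draws it occurs and keeps those
-- occurring in all of them, instead of A's fold of pairwise set intersections (objective: alternative).

-- ===== PORT A =====
def compute_streak_numbers (history : List (List Int)) (streak : Int) : List Int :=
  if (history.length : Int) < streak then []
  else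
    let recent_sets := (PySem.List.slice history (some (-streak)) none).map (fun draw => PySem.Set.ofList draw)
    match recent_sets with
    | [] => []  -- Python raises IndexError on recent_sets[0] here; excluded by Pre_
    | c0 :: rest =>
      let common := rest.foldl (fun common s => PySem.Set.inter common s) c0
      PySem.List.sorted common (fun x => x) false

-- ===== PORT B =====
def compute_streak_numbers_alt (history : List (List Int)) (streak : Int) : List Int :=
  if (history.length : Int) < streak then []
  else
    let recent := PySem.List.slice history (some (-streak)) none
    let counts := recent.foldl
      (fun d draw => (PySem.Set.ofList draw).foldl (fun d n => d.modify n 0 (· + 1)) d)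
      PySem.Dict.empty
    PySem.List.sorted
      ((counts.items.filter (fun p => p.2 == (recent.length : Int))).map (fun p => p.1))
      (fun x => x) false

-- ===== PRECONDITION & SPEC =====
-- Pre_ excludes exactly the inputs where history[-streak:] is empty (streak ≤ -len(history)),
-- on which A raises IndexError at recent_sets[0]; A returns normally everywhere else.
def Pre_compute_streak_numbers (history : List (List Int)) (streak : Int) : Prop :=
  0 < (history.length : Int) + streak
instance (history : List (List Int)) (streak : Int) : Decidable (Pre_compute_streak_numbers history streak) := by unfold Pre_compute_streak_numbers; infer_instance

def pvWitness_compute_streak_numbers : List (List Int) × Int := ([[1, 2, 3], [2, 3, 4], [3, 5, 2]], 3)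

def Spec_compute_streak_numbers (history : List (List Int)) (streak : Int) (out : List Int) : Prop := out = compute_streak_numbers_alt history streak
instance (history : List (List Int)) (streak : Int) (out : List Int) : Decidable (Spec_compute_streak_numbers history streak out) := by unfold Spec_compute_streak_numbers; infer_instance

-- ===== CLAIM (what is proved, stated in full; the proofs are below) =====
def Claim_equal_compute_streak_numbers : Prop := ∀ (history : List (List Int)) (streak : Int), Dom_compute_streak_numbers history streak → Pre_compute_streak_numbers history streak → Spec_compute_streak_numbers history streak (compute_streak_numbers history streak)

-- ===== LEMMAS AND PROOFS =====

-- membership in A's intersection fold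
lemma mem_foldl_inter (sets : List (PySem.Set Int)) (c : PySem.Set Int) (x : Int) :
    x ∈ sets.foldl (fun common s => PySem.Set.inter common s) c ↔ x ∈ c ∧ ∀ s ∈ sets, x ∈ s := by
  induction sets generalizing c with
  | nil => simp
  | cons s t ih => simp [List.foldl_cons, ih, PySem.Set.mem_inter]; tauto

lemma nodup_foldl_inter (sets : List (PySem.Set Int)) (c : PySem.Set Int) (h : c.Nodup) :
    (sets.foldl (fun common s => PySem.Set.inter common s) c).Nodup := by
  induction sets generalizing c with
  | nil => exact h
  | cons s t ih => exact ih _ (PySem.Set.nodup_inter _ _ h)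

-- B's counting loop is the counter of the flattened deduplicated draws
lemma counts_eq_counter (recent : List (List Int)) :
    recent.foldl (fun d draw => (PySem.Set.ofList draw).foldl (fun d n => d.modify n 0 (· + 1)) d)
      PySem.Dict.empty
    = PySem.Dict.counter (recent.flatMap (fun draw => PySem.Set.ofList draw)) := by
  rw [PySem.Dict.counter_eq_foldl]
  generalize PySem.Dict.empty = init
  induction recent generalizing init with
  | nil => rfl
  | cons d t ih => simp [List.flatMap_cons, List.foldl_append, ih]

-- B's filter-and-project of the counter items is a filter of its key set
lemma blist (L : List Int) (m : Int) :
    (((PySem.Set.ofList L).map (fun k => (k, (L.count k : Int)))).filter (fun p => p.2 == m)).map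
        (fun p => p.1)
    = (PySem.Set.ofList L).filter (fun k => (L.count k : Int) == m) := by
  rw [List.filter_map, List.map_map]
  simp [Function.comp_def]

-- how often a number occurs in the flattened deduplicated draws
lemma count_flat (recent : List (List Int)) (k : Int) :
    (recent.flatMap (fun draw => PySem.Set.ofList draw)).count k
      = recent.countP (fun draw => decide (k ∈ draw)) := by
  induction recent with
  | nil => rfl
  | cons d t ih =>
    rw [List.flatMap_cons, List.count_append, List.countP_cons, ih]
    by_cases h : k ∈ d
    · rw [List.count_eq_one_of_mem (PySem.Set.nodup_ofList d) ((PySem.Set.mem_ofList d k).mpr h)]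
      simp [h, Nat.add_comm]
    · rw [List.count_eq_zero_of_not_mem (fun hc => h ((PySem.Set.mem_ofList d k).mp hc))]
      simp [h]

-- the recent slice is nonempty on Pre_
lemma recent_ne_nil (history : List (List Int)) (streak : Int)
    (hlt : ¬ (history.length : Int) < streak)
    (hpre : 0 < (history.length : Int) + streak) :
    PySem.List.slice history (some (-streak)) none ≠ [] := by
  rw [PySem.List.slice_some_none, Ne, List.drop_eq_nil_iff, not_le]
  simp only [PySem.List.clampIdx]
  split_ifs with h1 h2 <;> omega

theorem equal_main (history : List (List Int)) (streak : Int)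
    (hpre : Pre_compute_streak_numbers history streak) :
    compute_streak_numbers history streak = compute_streak_numbers_alt history streak := by
  unfold compute_streak_numbers compute_streak_numbers_alt
  by_cases hlt : (history.length : Int) < streak
  · simp [hlt]
  · simp only [hlt, ite_false]
    set recent := PySem.List.slice history (some (-streak)) none with hrec
    have hne : recent ≠ [] := recent_ne_nil history streak hlt hpre
    obtain ⟨r0, rtl, hr⟩ := List.exists_cons_of_ne_nil hne
    rw [hr]
    simp only [List.map_cons]
    rw [counts_eq_counter (r0 :: rtl), PySem.Dict.items_counter,
        blist ((r0 :: rtl).flatMap (fun draw => PySem.Set.ofList draw)) ((r0 :: rtl).length : Int)]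
    set L := (r0 :: rtl).flatMap (fun draw => PySem.Set.ofList draw) with hL
    apply PySem.List.sorted_eq_sorted_of_perm _ _ _ (fun a b h => h)
    rw [List.perm_ext_iff_of_nodup
      (nodup_foldl_inter _ _ (PySem.Set.nodup_ofList r0))
      (List.Nodup.filter _ (PySem.Set.nodup_ofList L))]
    intro x
    rw [mem_foldl_inter, List.mem_filter]
    have hcnt : ((L.count x : Int) == ((r0 :: rtl).length : Int)) = true
        ↔ ∀ d ∈ (r0 :: rtl), x ∈ d := by
      rw [beq_iff_eq, hL, count_flat]
      constructor
      · intro h d hd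
        have hnat : (r0 :: rtl).countP (fun draw => decide (x ∈ draw)) = (r0 :: rtl).length := by
          exact_mod_cast h
        exact of_decide_eq_true (List.countP_eq_length.mp hnat d hd)
      · intro h
        have hnat : (r0 :: rtl).countP (fun draw => decide (x ∈ draw)) = (r0 :: rtl).length :=
          List.countP_eq_length.mpr (fun d hd => decide_eq_true (h d hd))
        exact_mod_cast hnat
    constructor
    · rintro ⟨hx0, hxs⟩
      have hall : ∀ d ∈ (r0 :: rtl), x ∈ d := by
        intro d hd
        rcases List.mem_cons.mp hd with h | h
        · exact h ▸ (PySem.Set.mem_ofList r0 x).mp hx0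
        · exact (PySem.Set.mem_ofList d x).mp (hxs _ (List.mem_map_of_mem h))
      refine ⟨(PySem.Set.mem_ofList L x).mpr ?_, hcnt.mpr hall⟩
      exact List.mem_flatMap.mpr ⟨r0, List.mem_cons_self .., hx0⟩
    · rintro ⟨_, hc⟩
      have hall := hcnt.mp hc
      refine ⟨(PySem.Set.mem_ofList r0 x).mpr (hall r0 (List.mem_cons_self ..)), ?_⟩
      intro s hs
      obtain ⟨d, hd, rfl⟩ := List.mem_map.mp hs
      exact (PySem.Set.mem_ofList d x).mpr (hall d (List.mem_cons_of_mem _ hd))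

-- ===== VERDICT (by name: the statement is the Claim_ definition above) =====
theorem compute_streak_numbers_spec : Claim_equal_compute_streak_numbers := by
  intro history streak _ hpre
  unfold Spec_compute_streak_numbers
  exact equal_main history streak hpre
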